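-- pv_equiv track=rewrite | github.com/remotenesd/MUSWADA | src/UI/tester2.py | pseudoSignature
-- ===== SOURCE A (Python) =====
-- def pseudoSignature(s, dictSigs):
--     nextC = 'a'
--     setChars = {}
--     signature = ""
--     i = max(3,len(s) - 3)
--     k = -1
--     while i > 0:
--         if s[:-i] in dictSigs:
--             k = i
--             signature = dictSigs[s[:-i]]
--             nextC = chr(ord(signature[-1]) + 1)
--             break
--         i-=1
--     if k > 0:
--         for c in s[-i:] :
--                 if c not in setChars:
--                     setChars[c] = nextC
--                     nextC = chr(ord(nextC) + 1)
--                 signature += setChars[c]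
--     else:
--         for c in s:
--             if c not in setChars:
--                 setChars[c] = nextC
--                 nextC = chr(ord(nextC) + 1)
--             signature += setChars[c]
--     return signature
-- ===== SOURCE B (Python) =====
-- def pseudoSignature(s, dictSigs):
--     n = len(s)
--     lo = max(0, n - max(3, n - 3))
--     hi = max(0, n - 1)
--     best = None
--     for k in dictSigs:
--         if lo <= len(k) <= hi and s.startswith(k):
--             if best is None or len(k) < len(best):
--                 best = k
--     if best is not None:
--         sig = dictSigs[best]
--         nextC = chr(ord(sig[-1]) + 1)
--         rest = s[len(best):]
--     else:
--         sig = ""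
--         nextC = 'a'
--         rest = s
--     mapping = {}
--     out = []
--     for c in rest:
--         if c not in mapping:
--             mapping[c] = nextC
--             nextC = chr(ord(nextC) + 1)
--         out.append(mapping[c])
--     return sig + ''.join(out)
-- ===== Notes on version B (the rewrite author's own statement) =====
-- stated objective: alternative
-- what changed: Instead of counting a length index down and testing successive prefix slices s[:-i] for dict membership, B scans the dictionary's keys once, keeps those that are prefixes of s with length in the window [max(0,len(s)-max(3,len(s)-3)), max(0,len(s)-1)], selects the shortest, and then canonicalizes the remaining suffix by a fresh-letter mapping built into a list that is joined once.
import Mathlib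
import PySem

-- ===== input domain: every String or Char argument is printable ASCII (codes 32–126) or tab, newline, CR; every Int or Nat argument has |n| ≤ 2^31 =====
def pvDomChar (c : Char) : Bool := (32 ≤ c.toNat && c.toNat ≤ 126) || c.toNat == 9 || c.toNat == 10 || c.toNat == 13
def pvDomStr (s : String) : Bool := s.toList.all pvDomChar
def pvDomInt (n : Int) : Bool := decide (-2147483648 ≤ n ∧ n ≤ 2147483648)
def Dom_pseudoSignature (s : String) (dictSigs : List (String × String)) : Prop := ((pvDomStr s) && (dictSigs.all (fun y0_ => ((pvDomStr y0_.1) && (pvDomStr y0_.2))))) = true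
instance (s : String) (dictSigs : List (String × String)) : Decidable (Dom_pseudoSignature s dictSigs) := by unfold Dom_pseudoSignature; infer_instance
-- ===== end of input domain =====

-- B replaces A's countdown over prefix slices s[:-i] by a single scan of the dictionary's keys
-- (shortest prefix key of s whose length lies in A's window), and builds the mapped suffix as a
-- list joined once instead of repeated string concatenation: alternative decomposition, same values.

-- ===== PORT A =====
-- chr(ord(c) + 1) (exact for the code points reached here, all far below the surrogate range)
def pvChr1 (c : Char) : Char := Char.ofNat (c.toNat + 1)

-- the for-c-in loop of A: setChars / nextC / signature accumulated by string concatenation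
def paLoop : List Char → PySem.Dict Char Char → Char → List Char → List Char
  | [], _, _, acc => acc
  | c :: cs, set, nc, acc =>
    match PySem.Dict.get? set c with
    | some v => paLoop cs set nc (acc ++ [v])
    | none   => paLoop cs (PySem.Dict.insert set c nc) (pvChr1 nc) (acc ++ [nc])

-- the while loop: i counts down from max(3, len(s)-3); first i with s[:-i] in dictSigs
def paFind (cs : List Char) (d : List (String × String)) : Nat → Option (Nat × String)
  | 0 => none
  | i + 1 =>
    match PySem.Dict.get? ⟨d⟩ (String.ofList (PySem.Chars.slice cs none (some (-(((i + 1 : Nat)) : Int))))) with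
    | some v => some (i + 1, v)
    | none => paFind cs d i

def pseudoSignature (s : String) (dictSigs : List (String × String)) : String :=
  let cs := s.toList
  match paFind cs dictSigs (max 3 (cs.length - 3)) with
  | some (i, sig) =>
      -- nextC = chr(ord(signature[-1]) + 1); Python raises IndexError when signature = "" (outside Pre_)
      let nc := match PySem.Chars.pyGet? sig.toList (-1) with
        | some c => pvChr1 c
        | none => 'a'
      String.ofList (paLoop (PySem.Chars.slice cs (some (-((i : Nat) : Int))) none) PySem.Dict.empty nc sig.toList)
  | none => String.ofList (paLoop cs PySem.Dict.empty 'a' [])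

-- ===== PORT B =====
-- one scan over the dict's entries keeping the shortest key that is a prefix of s with length in [lo, hi]
def pbBest (cs : List Char) (lo hi : Nat) : List (String × String) → Option String → Option String
  | [], best => best
  | (k, _) :: rest, best =>
    if lo ≤ k.toList.length ∧ k.toList.length ≤ hi ∧ PySem.Chars.startswith cs k.toList = true then
      match best with
      | none => pbBest cs lo hi rest (some k)
      | some b =>
        if k.toList.length < b.toList.length then pbBest cs lo hi rest (some k)
        else pbBest cs lo hi rest (some b)
    else pbBest cs lo hi rest best

-- the for-c-in-rest loop of B: out.append(mapping[c]) collected as a list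
def pbMap : PySem.Dict Char Char → Char → List Char → List Char
  | _, _, [] => []
  | set, nc, c :: cs =>
    match PySem.Dict.get? set c with
    | some v => v :: pbMap set nc cs
    | none   => nc :: pbMap (PySem.Dict.insert set c nc) (pvChr1 nc) cs

def pseudoSignature_alt (s : String) (dictSigs : List (String × String)) : String :=
  let cs := s.toList
  let lo := cs.length - max 3 (cs.length - 3)   -- max(0, n - max(3, n-3)) via Nat truncation
  let hi := cs.length - 1                        -- max(0, n - 1) via Nat truncation
  match pbBest cs lo hi dictSigs none with
  | some k =>
    match PySem.Dict.get? ⟨dictSigs⟩ k with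
    | some sig =>
        -- chr(ord(sig[-1]) + 1); Python raises IndexError when sig = "" (outside Pre_)
        let nc := match PySem.Chars.pyGet? sig.toList (-1) with
          | some c => pvChr1 c
          | none => 'a'
        String.ofList (sig.toList ++ pbMap PySem.Dict.empty nc (cs.drop k.toList.length))
    | none => ""   -- unreachable: best is a key occurring in dictSigs
  | none => String.ofList (pbMap PySem.Dict.empty 'a' cs)

-- ===== PRECONDITION & SPEC =====
def pvPrefix (cs : List Char) (p : Nat) : String := String.ofList (cs.take p)

-- Pre_ excludes exactly the inputs where Python's A raises IndexError: the shortest matching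
-- prefix key in the search window carries the empty string as its value, so signature[-1] fails.
def Pre_pseudoSignature (s : String) (dictSigs : List (String × String)) : Prop :=
  ∀ p : Nat, p ≤ s.toList.length - 1 →
    s.toList.length - max 3 (s.toList.length - 3) ≤ p →
    PySem.Dict.get? ⟨dictSigs⟩ (pvPrefix s.toList p) = some "" →
    ∃ q < p, s.toList.length - max 3 (s.toList.length - 3) ≤ q ∧
      (PySem.Dict.get? ⟨dictSigs⟩ (pvPrefix s.toList q)).isSome = true
instance (s : String) (dictSigs : List (String × String)) : Decidable (Pre_pseudoSignature s dictSigs) := by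
  unfold Pre_pseudoSignature; infer_instance

def pvWitness_pseudoSignature : String × (List (String × String)) := ("abcd", [("a", "xy")])

def Spec_pseudoSignature (s : String) (dictSigs : List (String × String)) (out : String) : Prop := out = pseudoSignature_alt s dictSigs
instance (s : String) (dictSigs : List (String × String)) (out : String) : Decidable (Spec_pseudoSignature s dictSigs out) := by unfold Spec_pseudoSignature; infer_instance

-- ===== CLAIM (what is proved, stated in full; the proofs are below) =====
def Claim_equal_pseudoSignature : Prop := ∀ (s : String) (dictSigs : List (String × String)), Dom_pseudoSignature s dictSigs → Pre_pseudoSignature s dictSigs → Spec_pseudoSignature s dictSigs (pseudoSignature s dictSigs)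

-- ===== LEMMAS AND PROOFS =====

-- the dict lookup both search loops are really about: the prefix of cs of length p
def matchAt (d : List (String × String)) (cs : List Char) (p : Nat) : Option String :=
  PySem.Dict.get? ⟨d⟩ (String.ofList (cs.take p))

-- the membership test B's scan uses
def okKey (cs : List Char) (lo hi : Nat) (k : String) : Prop :=
  lo ≤ k.toList.length ∧ k.toList.length ≤ hi ∧ k.toList <+: cs

lemma clampIdx_neg (n : Nat) (j : Nat) (hj : 1 ≤ j) :
    PySem.List.clampIdx n (-((j : Nat) : Int)) = n - j := by
  unfold PySem.List.clampIdx; split_ifs <;> omega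

lemma slice_stop_neg (cs : List Char) (j : Nat) (hj : 1 ≤ j) :
    PySem.Chars.slice cs none (some (-((j : Nat) : Int))) = cs.take (cs.length - j) := by
  simp [PySem.Chars.slice_eq_listSlice, PySem.List.slice, clampIdx_neg cs.length j hj]

lemma slice_start_neg (cs : List Char) (j : Nat) (hj : 1 ≤ j) :
    PySem.Chars.slice cs (some (-((j : Nat) : Int))) none = cs.drop (cs.length - j) := by
  simp [PySem.Chars.slice_eq_listSlice, PySem.List.slice, clampIdx_neg cs.length j hj]

lemma paLoop_eq (cs : List Char) : ∀ (set : PySem.Dict Char Char) (nc : Char) (acc : List Char),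
    paLoop cs set nc acc = acc ++ pbMap set nc cs := by
  induction cs with
  | nil => intro set nc acc; simp [paLoop, pbMap]
  | cons c cs ih =>
    intro set nc acc
    cases h : PySem.Dict.get? set c with
    | some v => simp [paLoop, pbMap, h, ih]
    | none => simp [paLoop, pbMap, h, ih]

lemma paFind_succ (cs : List Char) (d : List (String × String)) (i : Nat) :
    paFind cs d (i + 1) =
      match matchAt d cs (cs.length - (i + 1)) with
      | some v => some (i + 1, v)
      | none => paFind cs d i := by
  rw [paFind, slice_stop_neg cs (i + 1) (by omega)]; rfl

lemma paFind_eq_none_iff (cs : List Char) (d : List (String × String)) :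
    ∀ i, 1 ≤ i → (paFind cs d i = none ↔
      ∀ p, cs.length - i ≤ p → p ≤ cs.length - 1 → matchAt d cs p = none) := by
  intro i
  induction i with
  | zero => omega
  | succ i ih =>
    intro _
    rw [paFind_succ]
    cases hm : matchAt d cs (cs.length - (i + 1)) with
    | some v =>
      refine ⟨fun h => by simp at h, fun h => ?_⟩
      exact absurd (h (cs.length - (i + 1)) le_rfl (by omega)) (by simp [hm])
    | none =>
      by_cases hi : 1 ≤ i
      · rw [ih hi]
        constructor
        · intro h p hp1 hp2
          rcases (by omega : cs.length - i ≤ p ∨ p = cs.length - (i + 1)) with h' | h'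
          · exact h p h' hp2
          · rw [h']; exact hm
        · intro h p hp1 hp2
          exact h p (by omega) hp2
      · have hi0 : i = 0 := by omega
        subst hi0
        simp only [paFind, true_iff]
        intro p hp1 hp2
        have : p = cs.length - 1 := by omega
        rw [this]
        simpa using hm

lemma paFind_some (cs : List Char) (d : List (String × String)) :
    ∀ i j v, paFind cs d i = some (j, v) →
      1 ≤ j ∧ j ≤ i ∧ matchAt d cs (cs.length - j) = some v ∧
      ∀ p, cs.length - i ≤ p → p < cs.length - j → matchAt d cs p = none := by
  intro i
  induction i with
  | zero => intro j v h; simp [paFind] at h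
  | succ i ih =>
    intro j v h
    rw [paFind_succ] at h
    cases hm : matchAt d cs (cs.length - (i + 1)) with
    | some w =>
      rw [hm] at h
      have h1 : i + 1 = j := (Prod.ext_iff.mp (Option.some.inj h)).1
      have h2 : w = v := (Prod.ext_iff.mp (Option.some.inj h)).2
      subst h1; subst h2
      exact ⟨by omega, le_rfl, hm, fun p hp1 hp2 => absurd hp1 (by omega)⟩
    | none =>
      rw [hm] at h
      obtain ⟨h1, h2, h3, h4⟩ := ih j v h
      refine ⟨h1, by omega, h3, ?_⟩
      intro p hp1 hp2
      rcases (by omega : cs.length - i ≤ p ∨ p = cs.length - (i + 1)) with h' | h'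
      · exact h4 p h' hp2
      · rw [h']; exact hm

lemma ok_cond (cs : List Char) (lo hi : Nat) (k : String) :
    okKey cs lo hi k ↔
      (lo ≤ k.toList.length ∧ k.toList.length ≤ hi ∧ PySem.Chars.startswith cs k.toList = true) := by
  simp [okKey, PySem.Chars.startswith_iff]

lemma pbBest_spec (cs : List Char) (lo hi : Nat) :
    ∀ (l : List (String × String)) (best : Option String),
      (∀ b, best = some b → okKey cs lo hi b) →
      match pbBest cs lo hi l best with
      | none => best = none ∧ ∀ kv ∈ l, ¬ okKey cs lo hi kv.1
      | some k => okKey cs lo hi k ∧ ((∃ v, (k, v) ∈ l) ∨ best = some k) ∧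
          (∀ kv ∈ l, okKey cs lo hi kv.1 → k.toList.length ≤ kv.1.toList.length) ∧
          (∀ b, best = some b → k.toList.length ≤ b.toList.length) := by
  intro l
  induction l with
  | nil =>
    intro best hb
    cases best with
    | none => simp [pbBest]
    | some b =>
      refine ⟨hb b rfl, Or.inr rfl, ?_, ?_⟩
      · intro kv hkv; cases hkv
      · intro b' hb'; cases hb'; exact le_rfl
  | cons kv rest ih =>
    obtain ⟨k, v⟩ := kv
    intro best hb
    by_cases hc : lo ≤ k.toList.length ∧ k.toList.length ≤ hi ∧ PySem.Chars.startswith cs k.toList = true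
    · have hok : okKey cs lo hi k := (ok_cond cs lo hi k).mpr hc
      cases best with
      | none =>
        simp only [pbBest, if_pos hc]
        have H := ih (some k) (fun b hb' => by cases hb'; exact hok)
        cases hres : pbBest cs lo hi rest (some k) with
        | none => rw [hres] at H; exact absurd H.1 (by simp)
        | some r =>
          rw [hres] at H
          obtain ⟨hr, hmem, hminl, hminb⟩ := H
          refine ⟨hr, ?_, ?_, fun b hb' => by cases hb'⟩
          · rcases hmem with ⟨v', hv'⟩ | h'
            · exact Or.inl ⟨v', List.mem_cons_of_mem _ hv'⟩
            · cases h'; exact Or.inl ⟨v, List.mem_cons_self ..⟩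
          · intro kv hkv hokv
            rcases List.mem_cons.mp hkv with h' | h'
            · cases h'; exact hminb k rfl
            · exact hminl kv h' hokv
      | some b =>
        by_cases hlt : k.toList.length < b.toList.length
        · simp only [pbBest, if_pos hc, if_pos hlt]
          have H := ih (some k) (fun b' hb' => by cases hb'; exact hok)
          cases hres : pbBest cs lo hi rest (some k) with
          | none => rw [hres] at H; exact absurd H.1 (by simp)
          | some r =>
            rw [hres] at H
            obtain ⟨hr, hmem, hminl, hminb⟩ := H
            have hrk : r.toList.length ≤ k.toList.length := hminb k rfl
            refine ⟨hr, ?_, ?_, fun b' hb' => by cases hb'; omega⟩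
            · rcases hmem with ⟨v', hv'⟩ | h'
              · exact Or.inl ⟨v', List.mem_cons_of_mem _ hv'⟩
              · cases h'; exact Or.inl ⟨v, List.mem_cons_self ..⟩
            · intro kv hkv hokv
              rcases List.mem_cons.mp hkv with h' | h'
              · cases h'; exact hrk
              · exact hminl kv h' hokv
        · simp only [pbBest, if_pos hc, if_neg hlt]
          have H := ih (some b) hb
          cases hres : pbBest cs lo hi rest (some b) with
          | none => rw [hres] at H; exact absurd H.1 (by simp)
          | some r =>
            rw [hres] at H
            obtain ⟨hr, hmem, hminl, hminb⟩ := H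
            have hrb : r.toList.length ≤ b.toList.length := hminb b rfl
            refine ⟨hr, ?_, ?_, fun b' hb' => by cases hb'; exact hrb⟩
            · rcases hmem with ⟨v', hv'⟩ | h'
              · exact Or.inl ⟨v', List.mem_cons_of_mem _ hv'⟩
              · exact Or.inr h'
            · intro kv hkv hokv
              rcases List.mem_cons.mp hkv with h' | h'
              · cases h'; show r.toList.length ≤ k.toList.length; omega
              · exact hminl kv h' hokv
    · simp only [pbBest, if_neg hc]
      have H := ih best hb
      have hnok : ¬ okKey cs lo hi k := fun h => hc ((ok_cond cs lo hi k).mp h)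
      cases hres : pbBest cs lo hi rest best with
      | none =>
        rw [hres] at H
        refine ⟨H.1, ?_⟩
        intro kv hkv
        rcases List.mem_cons.mp hkv with h' | h'
        · cases h'; exact hnok
        · exact H.2 kv h'
      | some r =>
        rw [hres] at H
        obtain ⟨hr, hmem, hminl, hminb⟩ := H
        refine ⟨hr, ?_, ?_, hminb⟩
        · rcases hmem with ⟨v', hv'⟩ | h'
          · exact Or.inl ⟨v', List.mem_cons_of_mem _ hv'⟩
          · exact Or.inr h'
        · intro kv hkv hokv
          rcases List.mem_cons.mp hkv with h' | h'
          · cases h'; exact absurd hokv hnok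
          · exact hminl kv h' hokv

-- membership of a key in the association list makes the dict lookup succeed
lemma get?_isSome_of_mem (d : List (String × String)) (k : String) (v : String)
    (h : (k, v) ∈ d) : (PySem.Dict.get? (⟨d⟩ : PySem.Dict String String) k).isSome = true := by
  simp only [PySem.Dict.get?, Option.isSome_map]
  rw [List.find?_isSome]
  exact ⟨(k, v), h, by simp⟩

lemma mem_of_get?_eq_some (d : List (String × String)) (k : String) (v : String)
    (h : PySem.Dict.get? (⟨d⟩ : PySem.Dict String String) k = some v) : ∃ v', (k, v') ∈ d := by
  simp only [PySem.Dict.get?, Option.map_eq_some_iff] at h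
  obtain ⟨a, ha, hv⟩ := h
  have hk : a.1 = k := by simpa using List.find?_some ha
  exact ⟨a.2, by rw [← hk]; exact List.mem_of_find?_eq_some ha⟩

lemma key_eq (cs : List Char) (k : String) (hk : k.toList <+: cs) :
    String.ofList (cs.take k.toList.length) = k := by
  rw [← List.prefix_iff_eq_take.mp hk, String.ofList_toList]

-- ===== VERDICT (by name: the statement is the Claim_ definition above) =====
theorem pseudoSignature_spec : Claim_equal_pseudoSignature := by
  intro s d _ _
  unfold Spec_pseudoSignature pseudoSignature pseudoSignature_alt
  simp only []
  cases hfind : paFind s.toList d (max 3 (s.toList.length - 3)) with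
  | none =>
    have hnone := (paFind_eq_none_iff s.toList d (max 3 (s.toList.length - 3)) (by omega)).mp hfind
    have HB := pbBest_spec s.toList (s.toList.length - max 3 (s.toList.length - 3))
      (s.toList.length - 1) d none (fun b hb => by cases hb)
    cases hbest : pbBest s.toList (s.toList.length - max 3 (s.toList.length - 3))
        (s.toList.length - 1) d none with
    | some k =>
      rw [hbest] at HB
      obtain ⟨hok, hmem, _, _⟩ := HB
      rcases hmem with ⟨v, hv⟩ | h'
      · have hs := get?_isSome_of_mem d k v hv
        have hn := hnone k.toList.length hok.1 hok.2.1
        rw [matchAt, key_eq s.toList k hok.2.2] at hn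
        rw [hn] at hs
        simp at hs
      · cases h'
    | none =>
      rw [paLoop_eq]
      simp
  | some res =>
    obtain ⟨j, sig⟩ := res
    obtain ⟨hj1, hjM, hmj, hmin⟩ := paFind_some s.toList d (max 3 (s.toList.length - 3)) j sig hfind
    have hmj' : PySem.Dict.get? (⟨d⟩ : PySem.Dict String String)
        (String.ofList (s.toList.take (s.toList.length - j))) = some sig := hmj
    obtain ⟨v', hv'⟩ := mem_of_get?_eq_some d _ sig hmj'
    have hlen : (s.toList.take (s.toList.length - j)).length = s.toList.length - j := by
      simp [List.length_take]
    have hokp : okKey s.toList (s.toList.length - max 3 (s.toList.length - 3))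
        (s.toList.length - 1) (String.ofList (s.toList.take (s.toList.length - j))) := by
      refine ⟨?_, ?_, ?_⟩
      · rw [String.toList_ofList, hlen]; omega
      · rw [String.toList_ofList, hlen]; omega
      · rw [String.toList_ofList]; exact List.take_prefix _ _
    have HB := pbBest_spec s.toList (s.toList.length - max 3 (s.toList.length - 3))
      (s.toList.length - 1) d none (fun b hb => by cases hb)
    cases hbest : pbBest s.toList (s.toList.length - max 3 (s.toList.length - 3))
        (s.toList.length - 1) d none with
    | none =>
      rw [hbest] at HB
      exact absurd hokp (HB.2 (String.ofList (s.toList.take (s.toList.length - j)), v') hv')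
    | some k =>
      rw [hbest] at HB
      obtain ⟨hok, hmem, hminl, _⟩ := HB
      have hge : s.toList.length - j ≤ k.toList.length := by
        by_contra hcon
        have hcon : k.toList.length < s.toList.length - j := by omega
        have hmemk : ∃ vk, (k, vk) ∈ d := by
          rcases hmem with h' | h'
          · exact h'
          · cases h'
        obtain ⟨vk, hvk⟩ := hmemk
        have hs := get?_isSome_of_mem d k vk hvk
        have hn := hmin k.toList.length hok.1 hcon
        rw [matchAt, key_eq s.toList k hok.2.2] at hn
        rw [hn] at hs
        simp at hs
      have hle : k.toList.length ≤ s.toList.length - j := by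
        have := hminl (String.ofList (s.toList.take (s.toList.length - j)), v') hv' hokp
        simpa [hlen] using this
      have hklen : k.toList.length = s.toList.length - j := le_antisymm hle hge
      have hkey : k = String.ofList (s.toList.take (s.toList.length - j)) := by
        rw [← hklen]
        exact (key_eq s.toList k hok.2.2).symm
      have hget : PySem.Dict.get? (⟨d⟩ : PySem.Dict String String) k = some sig := by
        rw [hkey]; exact hmj'
      simp only [hget]
      rw [slice_start_neg s.toList j hj1, hklen, paLoop_eq]
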